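-- pv_equiv track=rewrite | github.com/yannickloth/W33-Theory | tests/test_polynomial_methods_computation.py | _count_k_matchings
-- ===== SOURCE A (Python) =====
-- from itertools import combinations
--
-- def _count_k_matchings(edges, k):
--     """Count k-matchings (k pairwise vertex-disjoint edges)."""
--     if k == 0:
--         return 1
--     if k == 1:
--         return len(edges)
--     n_edges = len(edges)
--     count = 0
--     for combo in combinations(range(n_edges), k):
--         vertices_used = set()
--         valid = True
--         for idx in combo:
--             u, v = edges[idx]
--             if u in vertices_used or v in vertices_used:
--                 valid = False
--                 break
--             vertices_used.add(u)
--             vertices_used.add(v)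
--         if valid:
--             count += 1
--     return count
-- ===== SOURCE B (Python) =====
-- def _count_k_matchings(edges, k):
--     """Count k-matchings (k pairwise vertex-disjoint edges)."""
--     def count(start, remaining, used):
--         if remaining == 0:
--             return 1
--         if start == len(edges):
--             return 0
--         total = count(start + 1, remaining, used)
--         u, v = edges[start]
--         if u not in used and v not in used:
--             total += count(start + 1, remaining - 1, used | {u, v})
--         return total
--     return count(0, k, set())
-- ===== Notes on version B (the rewrite author's own statement) =====
-- stated objective: alternative
-- what changed: Replaces the itertools.combinations enumeration (generate every k-subset of edge indices, then validate each) with a single recursive skip/take DFS over the edge list that prunes as soon as an endpoint is already used, subsuming the k==0 and k==1 special cases in the base cases.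
import Mathlib
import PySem

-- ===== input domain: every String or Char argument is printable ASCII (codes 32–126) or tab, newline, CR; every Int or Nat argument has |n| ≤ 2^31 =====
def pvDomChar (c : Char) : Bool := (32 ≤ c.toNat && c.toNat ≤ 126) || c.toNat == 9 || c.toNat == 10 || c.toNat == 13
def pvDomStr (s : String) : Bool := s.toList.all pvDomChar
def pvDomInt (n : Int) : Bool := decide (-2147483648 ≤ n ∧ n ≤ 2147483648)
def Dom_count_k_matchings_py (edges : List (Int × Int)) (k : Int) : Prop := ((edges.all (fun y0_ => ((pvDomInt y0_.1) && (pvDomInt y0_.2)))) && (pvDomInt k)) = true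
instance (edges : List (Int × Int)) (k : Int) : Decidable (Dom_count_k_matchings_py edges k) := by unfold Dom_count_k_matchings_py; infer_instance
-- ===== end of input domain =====

-- B replaces A's combinations-of-indices enumeration with a skip/take DFS over the edge list
-- (objective: alternative decomposition; base cases subsume A's k==0 / k==1 special cases).

-- ===== PORT A =====
-- itertools.combinations(xs, r) in lexicographic order of positions
def pvCombos {α : Type} : List α → Nat → List (List α)
  | _, 0 => [[]]
  | [], _ + 1 => []
  | x :: xs, r + 1 => (pvCombos xs r).map (fun c => x :: c) ++ pvCombos xs (r + 1)

-- A's inner loop over a combo of indices (break on a used endpoint); edges[idx] is always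
-- in range here (idx comes from range(len(edges))), so the pyGetD default is never used.
def pvValidA (edges : List (Int × Int)) : List Int → PySem.Set Int → Bool
  | [], _ => true
  | idx :: rest, used =>
    let e := PySem.List.pyGetD edges idx (0, 0)
    if used.contains e.1 || used.contains e.2 then false
    else pvValidA edges rest ((used.add e.1).add e.2)

def count_k_matchings_py (edges : List (Int × Int)) (k : Int) : Int :=
  if k = 0 then 1
  else if k = 1 then edges.length
  else
    (pvCombos (PySem.List.pyRange 0 edges.length 1) k.toNat).foldl
      (fun count combo => if pvValidA edges combo PySem.Set.empty then count + 1 else count) 0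

-- ===== PORT B =====
def pvDfs (es : List (Int × Int)) (remaining : Int) (used : PySem.Set Int) : Int :=
  if remaining = 0 then 1
  else match es with
    | [] => 0
    | (u, v) :: rest =>
      pvDfs rest remaining used +
      (if !(used.contains u) && !(used.contains v)
       then pvDfs rest (remaining - 1) ((used.add u).add v) else 0)
termination_by structural es

def count_k_matchings_py_alt (edges : List (Int × Int)) (k : Int) : Int :=
  pvDfs edges k PySem.Set.empty

-- ===== PRECONDITION & SPEC =====
-- Pre_ excludes k < 0, where A raises ValueError (combinations with a negative r).
def Pre_count_k_matchings_py (edges : List (Int × Int)) (k : Int) : Prop := 0 ≤ k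
instance (edges : List (Int × Int)) (k : Int) : Decidable (Pre_count_k_matchings_py edges k) := by unfold Pre_count_k_matchings_py; infer_instance
def pvWitness_count_k_matchings_py : (List (Int × Int)) × Int := ([(1, 2), (2, 3), (4, 5)], 2)

def Spec_count_k_matchings_py (edges : List (Int × Int)) (k : Int) (out : Int) : Prop := out = count_k_matchings_py_alt edges k
instance (edges : List (Int × Int)) (k : Int) (out : Int) : Decidable (Spec_count_k_matchings_py edges k out) := by unfold Spec_count_k_matchings_py; infer_instance

-- ===== CLAIM (what is proved, stated in full; the proofs are below) =====
def Claim_equal_count_k_matchings_py : Prop := ∀ (edges : List (Int × Int)) (k : Int), Dom_count_k_matchings_py edges k → Pre_count_k_matchings_py edges k → Spec_count_k_matchings_py edges k (count_k_matchings_py edges k)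

-- ===== LEMMAS AND PROOFS =====

-- proof-side validity of a combo given as actual edges (A's inner loop after indexing)
def pvValidL : List (Int × Int) → PySem.Set Int → Bool
  | [], _ => true
  | (u, v) :: rest, used =>
    if used.contains u || used.contains v then false
    else pvValidL rest ((used.add u).add v)

theorem pvCombos_map {α β : Type} (f : α → β) :
    ∀ (xs : List α) (r : Nat), pvCombos (xs.map f) r = (pvCombos xs r).map (List.map f) := by
  intro xs
  induction xs with
  | nil => intro r; cases r <;> simp [pvCombos]
  | cons x xs ih =>
    intro r
    cases r with
    | zero => simp [pvCombos]
    | succ s => simp [pvCombos, ih, Function.comp]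

theorem pvValidA_eq (edges : List (Int × Int)) :
    ∀ (c : List Int) (used : PySem.Set Int),
      pvValidA edges c used = pvValidL (c.map (fun i => PySem.List.pyGetD edges i (0, 0))) used := by
  intro c
  induction c with
  | nil => intro used; simp [pvValidA, pvValidL]
  | cons i rest ih =>
    intro used
    simp only [pvValidA, pvValidL, List.map_cons]
    split <;> simp [ih]

theorem pvFoldl_count {α : Type} (p : α → Bool) :
    ∀ (L : List α) (a : Int), L.foldl (fun c x => if p x then c + 1 else c) a = a + (L.countP p : Int) := by
  intro L
  induction L with
  | nil => intro a; simp
  | cons x xs ih =>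
    intro a
    by_cases h : p x = true <;> simp [List.countP_cons, h, ih] <;> ring

theorem pvDfs_eq :
    ∀ (es : List (Int × Int)) (r : Nat) (used : PySem.Set Int),
      pvDfs es (r : Int) used = ((pvCombos es r).countP (fun c => pvValidL c used) : Int) := by
  intro es
  induction es with
  | nil =>
    intro r used
    cases r with
    | zero => simp [pvDfs, pvCombos, pvValidL]
    | succ n =>
      have hne : ((n : Int) + 1) ≠ 0 := by positivity
      rw [pvDfs]
      push_cast
      rw [if_neg hne]
      simp [pvCombos]
  | cons e rest ih =>
    intro r used
    obtain ⟨u, v⟩ := e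
    cases r with
    | zero => simp [pvDfs, pvCombos, pvValidL]
    | succ s =>
      have hne : ((s : Int) + 1) ≠ 0 := by positivity
      rw [pvDfs]
      push_cast
      rw [if_neg hne]
      have hdm : (!(used.contains u) && !(used.contains v)) = !(used.contains u || used.contains v) := by
        cases used.contains u <;> cases used.contains v <;> rfl
      have ihs := ih s
      have ihs1 := ih (s + 1) used
      push_cast at ihs1
      cases hcond : (used.contains u || used.contains v) with
      | true =>
        have hval : ∀ c, pvValidL ((u, v) :: c) used = false := by
          intro c; simp only [pvValidL, hcond]; rfl
        rw [hdm, hcond]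
        simp only [Bool.not_true, if_neg, Bool.false_eq_true, not_false_iff, if_false]
        rw [ihs1]
        simp only [pvCombos, List.countP_append, List.countP_map, Function.comp_def, hval]
        simp
      | false =>
        have hval : ∀ c, pvValidL ((u, v) :: c) used = pvValidL c ((used.add u).add v) := by
          intro c; simp only [pvValidL, hcond]; rfl
        rw [hdm, hcond]
        simp only [Bool.not_false, if_pos]
        have hsub : ((s : Int) + 1) - 1 = (s : Int) := by ring
        rw [ihs1, hsub, ihs ((used.add u).add v)]
        simp only [pvCombos, List.countP_append, List.countP_map, Function.comp_def, hval]
        push_cast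
        ring

theorem pvDfs_zero (es : List (Int × Int)) (used : PySem.Set Int) : pvDfs es 0 used = 1 := by
  rw [pvDfs.eq_def]; simp

theorem pvDfs_one (es : List (Int × Int)) : pvDfs es 1 PySem.Set.empty = es.length := by
  induction es with
  | nil => rw [pvDfs]; simp
  | cons e rest ih =>
    obtain ⟨u, v⟩ := e
    rw [pvDfs]
    have hc : (!(PySem.Set.contains PySem.Set.empty u) && !(PySem.Set.contains PySem.Set.empty v)) = true := by rfl
    norm_num [hc]
    rw [pvDfs_zero]
    have ih' : pvDfs rest 1 [] = (rest.length : Int) := ih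
    rw [ih']

-- ===== VERDICT (by name: the statement is the Claim_ definition above) =====
theorem count_k_matchings_py_spec : Claim_equal_count_k_matchings_py := by
  intro edges k _ hk
  unfold Spec_count_k_matchings_py count_k_matchings_py count_k_matchings_py_alt
  by_cases h0 : k = 0
  · subst h0; exact (pvDfs_zero edges PySem.Set.empty).symm
  · by_cases h1 : k = 1
    · subst h1; exact (pvDfs_one edges).symm
    · simp only [h0, h1, if_false]
      have hk' : 0 ≤ k := hk
      have hk2 : k = (k.toNat : Int) := by omega
      rw [pvFoldl_count]
      have hmap : (PySem.List.pyRange 0 edges.length 1).map (fun i => PySem.List.pyGetD edges i (0, 0)) = edges :=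
        PySem.List.map_pyGetD_pyRange_zero edges (0, 0)
      have hcnt : (pvCombos (PySem.List.pyRange 0 edges.length 1) k.toNat).countP
            (fun combo => pvValidA edges combo PySem.Set.empty)
          = (pvCombos edges k.toNat).countP (fun c => pvValidL c PySem.Set.empty) := by
        have := pvCombos_map (fun i => PySem.List.pyGetD edges i (0, 0)) (PySem.List.pyRange 0 edges.length 1) k.toNat
        rw [hmap] at this
        rw [this, List.countP_map]
        apply List.countP_congr
        intro c _
        simp [Function.comp, pvValidA_eq]
      rw [hcnt, ← pvDfs_eq, ← hk2]
      exact zero_add _
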